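-- pv_equiv track=rewrite | github.com/anujajoo/cs313e | Boxes.py | largest_nesting_subsets
-- ===== SOURCE A (Python) =====
-- def largest_nesting_subsets (all_box_subsets):
--
--     #sort by size of subsets by # of elements, or len(subset)
--     #https://www.w3schools.com/python/ref_func_sorted.asp
--     subsets_largetosmall_n = sorted(all_box_subsets, key = len, reverse=True)
--
--     #by definition, each param has to be less than the fit inside box AND this means volume MUST be less.
--
--     #within this list of total subsets, sort each subset by the volume of the boxes in each one
--     for i in range(len(subsets_largetosmall_n)):
--         subsets_largetosmall_n[i].sort(key = lambda curr_box: curr_box[0] * curr_box[1] * curr_box[2])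
--
--
--     max_boxes = 0
--     num_max_boxes_sets = 0
--
--
--     for i in range(len(subsets_largetosmall_n)):
--         #default
--         does_nest = True
--         #call on spec subset for each loop
--         subset = subsets_largetosmall_n[i]
--
--         #within the subset (:-1), go through boxes
--         for j in range(len(subset[:-1])):
--             #fit is the nesting condition. if doesnt nest, break the tree algo
--             if does_fit(subset[j], subset[j + 1]) == False:
--                 does_nest = False
--                 break
--             #if does nest, then loop case of counting
--         if does_nest == True:
--
--             if num_max_boxes_sets == 0:
--                 max_boxes = len(subset)
--             #if current subset is less than the already IDd max one, we dont care, move on to next loop iteration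
--             if len(subset) < max_boxes:
--                 break
--             #if all checks out, add this set to the number of max boxes
--             else:
--                 num_max_boxes_sets += 1
--
--     return max_boxes, num_max_boxes_sets
--
-- def does_fit (box1, box2):
--   return (box1[0] < box2[0] and box1[1] < box2[1] and box1[2] < box2[2])
-- ===== SOURCE B (Python) =====
-- def does_fit(box1, box2):
--     return (box1[0] < box2[0] and box1[1] < box2[1] and box1[2] < box2[2])
--
--
-- def largest_nesting_subsets(all_box_subsets):
--     # One pass over the subsets in their given order (no outer sort),
--     # keeping a running (best_len, count).  Each subset is sorted in
--     # place by volume, exactly as A does.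
--     best_len = 0
--     count = 0
--     for subset in all_box_subsets:
--         subset.sort(key=lambda b: b[0] * b[1] * b[2])
--         if all(does_fit(x, y) for x, y in zip(subset, subset[1:])):
--             if len(subset) > best_len:
--                 best_len = len(subset)
--                 count = 1
--             elif len(subset) == best_len:
--                 count += 1
--     return best_len, count
-- ===== Notes on version B (the rewrite author's own statement) =====
-- stated objective: simpler
-- what changed: Drops A's descending outer sort and its break-based counting loop: B makes a single pass over the subsets in their given order, keeping a running (best_len, count) fold, and tests nesting with an all() over consecutive pairs via zip.
import Mathlib
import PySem

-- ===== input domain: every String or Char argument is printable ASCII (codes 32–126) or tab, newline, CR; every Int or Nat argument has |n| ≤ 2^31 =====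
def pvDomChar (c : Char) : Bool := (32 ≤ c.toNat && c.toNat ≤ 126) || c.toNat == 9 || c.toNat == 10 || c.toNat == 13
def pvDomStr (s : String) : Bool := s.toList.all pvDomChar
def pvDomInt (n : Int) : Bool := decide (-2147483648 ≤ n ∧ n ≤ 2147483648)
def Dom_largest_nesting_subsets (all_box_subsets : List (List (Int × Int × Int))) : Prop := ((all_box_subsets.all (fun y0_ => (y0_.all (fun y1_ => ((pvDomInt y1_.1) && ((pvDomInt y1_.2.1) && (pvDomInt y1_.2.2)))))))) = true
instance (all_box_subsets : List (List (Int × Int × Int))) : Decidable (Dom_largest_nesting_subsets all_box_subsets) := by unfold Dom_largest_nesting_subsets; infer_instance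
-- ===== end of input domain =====

-- B drops A's descending outer sort and break-driven counting loop and makes one fold over the
-- subsets in given order with a running (best_len, count); equivalence is about the RETURN value
-- (both Pythons sort each inner subset in place, producing the same mutation).

-- ===== PORT A =====
def does_fit (box1 box2 : Int × Int × Int) : Bool :=
  decide (box1.1 < box2.1) && decide (box1.2.1 < box2.2.1) && decide (box1.2.2 < box2.2.2)

-- the inner j-loop over subset[:-1] with its break: walks consecutive pairs
def nestLoopA : List (Int × Int × Int) → Bool
  | a :: b :: rest => if does_fit a b = false then false else nestLoopA (b :: rest)
  | _ => true

-- the outer i-loop with its break, state (max_boxes, num_max_boxes_sets)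
def loopA : List (List (Int × Int × Int)) → Int → Int → Int × Int
  | [], max_boxes, num_max => (max_boxes, num_max)
  | subset :: rest, max_boxes, num_max =>
    let does_nest := nestLoopA subset
    if does_nest = true then
      let max_boxes := if num_max = 0 then PySem.List.len subset else max_boxes
      if PySem.List.len subset < max_boxes then (max_boxes, num_max)   -- break
      else loopA rest max_boxes (num_max + 1)
    else loopA rest max_boxes num_max

def largest_nesting_subsets (all_box_subsets : List (List (Int × Int × Int))) : Int × Int :=
  let subsets_largetosmall_n := PySem.List.sorted all_box_subsets (fun s => PySem.List.len s) true
  -- 'for i: subsets[i].sort(key=volume)' sorts every element in place, i.e. maps the in-place sort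
  let subsets_largetosmall_n :=
    subsets_largetosmall_n.map (fun s => PySem.List.sorted s (fun b => b.1 * b.2.1 * b.2.2) false)
  loopA subsets_largetosmall_n 0 0

-- ===== PORT B =====
def stepB (st : Int × Int) (subset : List (Int × Int × Int)) : Int × Int :=
  let t := PySem.List.sorted subset (fun b => b.1 * b.2.1 * b.2.2) false   -- subset.sort(...): t is the subset after the in-place sort
  if (t.zip t.tail).all (fun p => does_fit p.1 p.2) then
    if st.1 < PySem.List.len t then (PySem.List.len t, 1)
    else if PySem.List.len t = st.1 then (st.1, st.2 + 1)
    else st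
  else st

def largest_nesting_subsets_alt (all_box_subsets : List (List (Int × Int × Int))) : Int × Int :=
  all_box_subsets.foldl stepB (0, 0)

-- ===== PRECONDITION & SPEC =====
def Spec_largest_nesting_subsets (all_box_subsets : List (List (Int × Int × Int))) (out : Int × Int) : Prop := out = largest_nesting_subsets_alt all_box_subsets
instance (all_box_subsets : List (List (Int × Int × Int))) (out : Int × Int) : Decidable (Spec_largest_nesting_subsets all_box_subsets out) := by unfold Spec_largest_nesting_subsets; infer_instance

-- ===== CLAIM (what is proved, stated in full; the proofs are below) =====
def Claim_equal_largest_nesting_subsets : Prop := ∀ (all_box_subsets : List (List (Int × Int × Int))), Dom_largest_nesting_subsets all_box_subsets → Spec_largest_nesting_subsets all_box_subsets (largest_nesting_subsets all_box_subsets)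

-- ===== LEMMAS AND PROOFS =====

-- B's step on an already inner-sorted subset
def stepS (st : Int × Int) (t : List (Int × Int × Int)) : Int × Int :=
  if (t.zip t.tail).all (fun p => does_fit p.1 p.2) then
    if st.1 < PySem.List.len t then (PySem.List.len t, 1)
    else if PySem.List.len t = st.1 then (st.1, st.2 + 1)
    else st
  else st

def isort (s : List (Int × Int × Int)) : List (Int × Int × Int) :=
  PySem.List.sorted s (fun b => b.1 * b.2.1 * b.2.2) false

theorem stepB_eq (st : Int × Int) (s : List (Int × Int × Int)) :
    stepB st s = stepS st (isort s) := rfl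

-- A's inner break-loop computes the consecutive-pairs all() of B
theorem nestLoopA_eq (t : List (Int × Int × Int)) :
    nestLoopA t = (t.zip t.tail).all (fun p => does_fit p.1 p.2) := by
  induction t with
  | nil => rfl
  | cons a rest ih =>
    cases rest with
    | nil => rfl
    | cons b r =>
      simp only [nestLoopA, List.tail_cons, List.zip_cons_cons, List.all_cons]
      by_cases h : does_fit a b = false
      · simp [h]
      · simp only [h]
        rw [ih]
        simp only [List.tail_cons]
        cases hf : does_fit a b <;> simp_all

-- clean unfoldings (definitional) with conditions stated over cast lengths
theorem stepS_eq (mx cnt : Int) (t : List (Int × Int × Int)) :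
    stepS (mx, cnt) t =
      if (t.zip t.tail).all (fun p => does_fit p.1 p.2) then
        if mx < (t.length : Int) then ((t.length : Int), 1)
        else if (t.length : Int) = mx then (mx, cnt + 1)
        else (mx, cnt)
      else (mx, cnt) := rfl

theorem loopA_cons (s : List (Int × Int × Int)) (rest : List (List (Int × Int × Int)))
    (mx cnt : Int) :
    loopA (s :: rest) mx cnt =
      if nestLoopA s = true then
        if (s.length : Int) < (if cnt = 0 then (s.length : Int) else mx) then
          ((if cnt = 0 then (s.length : Int) else mx), cnt)
        else loopA rest (if cnt = 0 then (s.length : Int) else mx) (cnt + 1)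
      else loopA rest mx cnt := rfl

-- stepS is skipped by every subset whose length is strictly below the running best
theorem foldl_stepS_const (L : List (List (Int × Int × Int))) (mx cnt : Int)
    (h : ∀ t ∈ L, (t.length : Int) < mx) :
    L.foldl stepS (mx, cnt) = (mx, cnt) := by
  induction L with
  | nil => rfl
  | cons t rest ih =>
    have ht := h t (by simp)
    have hst : stepS (mx, cnt) t = (mx, cnt) := by
      rw [stepS_eq]
      split
      · rw [if_neg (by omega), if_neg (by omega)]
      · rfl
    rw [List.foldl_cons, hst, ih (fun u hu => h u (by simp [hu]))]

-- after the first nesting subset, A's loop is B's fold (list still descending by length)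
theorem loopA_inv (L : List (List (Int × Int × Int))) (mx cnt : Int)
    (hcnt : 1 ≤ cnt)
    (hle : ∀ t ∈ L, (t.length : Int) ≤ mx)
    (hp : L.Pairwise (fun a b => (b.length : Int) ≤ (a.length : Int))) :
    loopA L mx cnt = L.foldl stepS (mx, cnt) := by
  induction L generalizing cnt with
  | nil => rfl
  | cons s rest ih =>
    have hs := hle s (by simp)
    rw [List.pairwise_cons] at hp
    have hle' : ∀ u ∈ rest, (u.length : Int) ≤ mx := fun u hu => hle u (by simp [hu])
    rw [loopA_cons, List.foldl_cons, stepS_eq]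
    by_cases hn : nestLoopA s = true
    · have hzip : ((s.zip s.tail).all fun p => does_fit p.1 p.2) = true := by
        rw [← nestLoopA_eq]; exact hn
      rw [if_pos hn, if_pos hzip, if_neg (show ¬ cnt = 0 by omega), if_neg (show ¬ mx < (s.length : Int) by omega)]
      by_cases hlt : (s.length : Int) < mx
      · rw [if_pos hlt, if_neg (by omega)]
        exact (foldl_stepS_const rest mx cnt
          (fun u hu => lt_of_le_of_lt (hp.1 u hu) hlt)).symm
      · rw [if_neg hlt, if_pos (by omega)]
        exact ih (cnt + 1) (by omega) hle' hp.2
    · have hzip : ¬ ((s.zip s.tail).all fun p => does_fit p.1 p.2) = true := by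
        rw [← nestLoopA_eq]; exact hn
      rw [if_neg hn, if_neg hzip]
      exact ih cnt hcnt hle' hp.2

-- from the initial state, on a descending-by-length list, A's loop is B's fold
theorem loopA_start (L : List (List (Int × Int × Int)))
    (hp : L.Pairwise (fun a b => (b.length : Int) ≤ (a.length : Int))) :
    loopA L 0 0 = L.foldl stepS (0, 0) := by
  induction L with
  | nil => rfl
  | cons s rest ih =>
    rw [List.pairwise_cons] at hp
    rw [loopA_cons, List.foldl_cons, stepS_eq]
    by_cases hn : nestLoopA s = true
    · have hzip : ((s.zip s.tail).all fun p => does_fit p.1 p.2) = true := by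
        rw [← nestLoopA_eq]; exact hn
      rw [if_pos hn, if_pos hzip, if_pos (show (0 : Int) = 0 from rfl),
          if_neg (show ¬ (s.length : Int) < (s.length : Int) by omega)]
      have hstate : (if (0 : Int) < (s.length : Int) then ((s.length : Int), (1 : Int))
          else if (s.length : Int) = 0 then ((0 : Int), (0 : Int) + 1) else (0, 0))
          = ((s.length : Int), 1) := by
        by_cases h0 : (0 : Int) < (s.length : Int)
        · rw [if_pos h0]
        · rw [if_neg h0, if_pos (by omega)]
          have hz : (s.length : Int) = 0 := by omega
          rw [hz]; norm_num
      rw [hstate, show (0 : Int) + 1 = 1 from rfl]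
      exact loopA_inv rest (s.length : Int) 1 (by omega) hp.1 hp.2
    · have hzip : ¬ ((s.zip s.tail).all fun p => does_fit p.1 p.2) = true := by
        rw [← nestLoopA_eq]; exact hn
      rw [if_neg hn, if_neg hzip]
      exact ih hp.2

-- B's fold step is right-commutative: it maintains a running max-with-multiplicity
theorem stepS_comm (st : Int × Int) (a b : List (Int × Int × Int)) :
    stepS (stepS st a) b = stepS (stepS st b) a := by
  obtain ⟨mx, cnt⟩ := st
  cases hna : ((a.zip a.tail).all fun p => does_fit p.1 p.2) <;>
  cases hnb : ((b.zip b.tail).all fun p => does_fit p.1 p.2) <;>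
    simp only [stepS_eq, hna, hnb, Bool.false_eq_true, if_true, if_false] <;>
    split_ifs <;>
    simp only [stepS_eq, hna, hnb, Bool.false_eq_true, if_true, if_false] <;>
    split_ifs <;>
    first
      | rfl
      | (refine Prod.ext ?_ ?_ <;> simp <;> omega)

-- the fold is invariant under permutation of the subset list
theorem foldl_stepS_perm {L₁ L₂ : List (List (Int × Int × Int))} (h : L₁.Perm L₂)
    (st : Int × Int) : L₁.foldl stepS st = L₂.foldl stepS st := by
  induction h generalizing st with
  | nil => rfl
  | cons x _ ih => simp [List.foldl_cons, ih]
  | swap x y l => simp [List.foldl_cons, stepS_comm]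
  | trans _ _ ih₁ ih₂ => rw [ih₁, ih₂]

-- ===== VERDICT (by name: the statement is the Claim_ definition above) =====
theorem largest_nesting_subsets_spec : Claim_equal_largest_nesting_subsets := by
  intro xs _
  unfold Spec_largest_nesting_subsets largest_nesting_subsets largest_nesting_subsets_alt
  simp only []
  -- A side: the inner-sorted, outer-sorted list
  set S := PySem.List.sorted xs (fun s => PySem.List.len s) true with hS
  have hpair : S.Pairwise (fun a b => PySem.List.len b ≤ PySem.List.len a) :=
    PySem.List.sorted_pairwise_rev xs (fun s => PySem.List.len s)
  have hpair' : (S.map isort).Pairwise (fun a b => PySem.List.len b ≤ PySem.List.len a) := by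
    refine List.Pairwise.map _ (fun a b h => ?_) hpair
    simpa [isort, PySem.List.len] using h
  have h1 : loopA (S.map (fun s => PySem.List.sorted s (fun b => b.1 * b.2.1 * b.2.2) false)) 0 0
      = (S.map isort).foldl stepS (0, 0) := loopA_start (S.map isort) hpair'
  rw [h1]
  have hperm : (S.map isort).Perm (xs.map isort) :=
    (PySem.List.sorted_perm xs (fun s => PySem.List.len s) true).map isort
  rw [foldl_stepS_perm hperm]
  rw [List.foldl_map]
  exact PySem.List.foldl_congr_mem _ _ _ _ (fun acc x _ => (stepB_eq acc x).symm)
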